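-- pv_equiv track=rewrite | github.com/ares-codes/Image-Filters | backend/string.py | calculate_line_points
-- ===== SOURCE A (Python) =====
-- def calculate_line_points(x0, y0, x1, y1, thickness):
--     """
--     Returns a list of (x, y) tuples representing the pixels on a thick line
--     between (x0, y0) and (x1, y1) with the specified thickness, while ensuring
--     that the pixels are inside a circular region defined by (h, k) and r.
--     """
--     # Check if the line is steep, and if so, swap x and y coordinates
--     is_steep = abs(y1 - y0) > abs(x1 - x0)
--     if is_steep:
--         x0, y0 = y0, x0
--         x1, y1 = y1, x1
--
--     # Check if the line goes from right to left, and if so, swap start and end points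
--     if x0 > x1:
--         x0, x1 = x1, x0
--         y0, y1 = y1, y0
--
--     dx = x1 - x0
--     dy = abs(y1 - y0)
--     error = dx / 2
--     y = y0
--     y_step = 1 if y0 < y1 else -1
--
--     line_pixels = []
--     for x in range(x0, x1 + 1):
--         if is_steep:
--             for i in range(-thickness // 2, (thickness + 1) // 2):
--                     line_pixels.append((y + i, x))
--         else:
--             for i in range(-thickness // 2, (thickness + 1) // 2):
--                     line_pixels.append((x, y + i))
--
--         error -= dy
--         if error < 0:
--             y += y_step
--             error += dx
--
--     return line_pixels
-- ===== SOURCE B (Python) =====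
-- def calculate_line_points(x0, y0, x1, y1, thickness):
--     """Closed-form rasterization: instead of running Bresenham's incremental
--     error accumulator, the y of each column k is computed directly by the
--     formula y0 + y_step * ((2*k*dy + dx - 1) // (2*dx)), which is the number
--     of error underflows after k steps of the recurrence (exact since the
--     float error is always a multiple of 1/2)."""
--     is_steep = abs(y1 - y0) > abs(x1 - x0)
--     if is_steep:
--         x0, y0, x1, y1 = y0, x0, y1, x1
--     if x0 > x1:
--         x0, x1, y0, y1 = x1, x0, y1, y0
--     dx = x1 - x0
--     dy = abs(y1 - y0)
--     y_step = 1 if y0 < y1 else -1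
--     pixels = []
--     for k in range(dx + 1):
--         y = y0 if dx == 0 else y0 + y_step * ((2 * k * dy + dx - 1) // (2 * dx))
--         for i in range(-thickness // 2, (thickness + 1) // 2):
--             pixels.append((y + i, x0 + k) if is_steep else (x0 + k, y + i))
--     return pixels
-- ===== Notes on version B (the rewrite author's own statement) =====
-- stated objective: alternative
-- what changed: B replaces Bresenham's incremental float-error accumulator with a stateless closed-form: the y of each column k is computed directly as y0 + y_step*((2*k*dy + dx - 1) // (2*dx)), so there is no running error/y state at all.
import Mathlib
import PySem

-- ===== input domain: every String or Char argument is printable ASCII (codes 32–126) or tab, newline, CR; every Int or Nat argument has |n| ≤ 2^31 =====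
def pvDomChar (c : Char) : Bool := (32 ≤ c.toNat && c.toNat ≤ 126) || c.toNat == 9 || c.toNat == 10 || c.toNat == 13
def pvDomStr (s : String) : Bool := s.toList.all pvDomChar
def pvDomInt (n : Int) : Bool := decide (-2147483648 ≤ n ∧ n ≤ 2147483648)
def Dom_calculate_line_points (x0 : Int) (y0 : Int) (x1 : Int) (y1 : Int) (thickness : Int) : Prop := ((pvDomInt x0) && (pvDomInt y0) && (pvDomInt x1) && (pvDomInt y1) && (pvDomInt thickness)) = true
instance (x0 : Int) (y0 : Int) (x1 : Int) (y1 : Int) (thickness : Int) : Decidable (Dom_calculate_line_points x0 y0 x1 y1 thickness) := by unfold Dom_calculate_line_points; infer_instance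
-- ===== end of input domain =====

-- B replaces A's incremental Bresenham error accumulator by a stateless closed-form
-- computation of each column's y; objective: alternative algorithm, same cost.

-- ===== PORT A =====
-- A's float `error` is represented doubled as an Int (E = 2*error): error starts at
-- dx/2 and afterwards only changes by integers, so E is exact and `error < 0 ↔ E < 0`.
-- Python's list.append loop is ported as a reversed accumulator (cons, reverse at end).
def pvALoop (is_steep : Bool) (thickness dx dy ystep : Int) :
    Int → Int → Int → Nat → List (Int × Int) → List (Int × Int)
  | _, _, _, 0, acc => acc
  | x, y, E, n+1, acc =>
    let offs := PySem.List.pyRange (PySem.Int.floordiv (-thickness) 2) (PySem.Int.floordiv (thickness + 1) 2) 1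
    let acc := (offs.map (fun i => if is_steep then (y + i, x) else (x, y + i))).reverse ++ acc
    let E := E - 2 * dy
    if E < 0 then pvALoop is_steep thickness dx dy ystep (x + 1) (y + ystep) (E + 2 * dx) n acc
    else pvALoop is_steep thickness dx dy ystep (x + 1) y E n acc

def calculate_line_points (x0 : Int) (y0 : Int) (x1 : Int) (y1 : Int) (thickness : Int) : List (Int × Int) :=
  let is_steep : Bool := |y1 - y0| > |x1 - x0|
  let (x0, y0, x1, y1) := if is_steep then (y0, x0, y1, x1) else (x0, y0, x1, y1)
  let (x0, x1, y0, y1) := if x0 > x1 then (x1, x0, y1, y0) else (x0, x1, y0, y1)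
  let dx := x1 - x0
  let dy := |y1 - y0|
  let ystep : Int := if y0 < y1 then 1 else -1
  -- for x in range(x0, x1+1): (x1 + 1 - x0).toNat iterations starting at x0
  (pvALoop is_steep thickness dx dy ystep x0 y0 dx (x1 + 1 - x0).toNat []).reverse

-- ===== PORT B =====
def calculate_line_points_alt (x0 : Int) (y0 : Int) (x1 : Int) (y1 : Int) (thickness : Int) : List (Int × Int) :=
  let is_steep : Bool := |y1 - y0| > |x1 - x0|
  let (x0, y0, x1, y1) := if is_steep then (y0, x0, y1, x1) else (x0, y0, x1, y1)
  let (x0, x1, y0, y1) := if x0 > x1 then (x1, x0, y1, y0) else (x0, x1, y0, y1)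
  let dx := x1 - x0
  let dy := |y1 - y0|
  let ystep : Int := if y0 < y1 then 1 else -1
  (PySem.List.pyRange 0 (dx + 1) 1).flatMap (fun k =>
    let y := if dx = 0 then y0
             else y0 + ystep * PySem.Int.floordiv (2 * k * dy + dx - 1) (2 * dx)
    (PySem.List.pyRange (PySem.Int.floordiv (-thickness) 2) (PySem.Int.floordiv (thickness + 1) 2) 1).map
      (fun i => if is_steep then (y + i, x0 + k) else (x0 + k, y + i)))

-- ===== PRECONDITION & SPEC =====
def Spec_calculate_line_points (x0 : Int) (y0 : Int) (x1 : Int) (y1 : Int) (thickness : Int) (out : List (Int × Int)) : Prop := out = calculate_line_points_alt x0 y0 x1 y1 thickness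
instance (x0 : Int) (y0 : Int) (x1 : Int) (y1 : Int) (thickness : Int) (out : List (Int × Int)) : Decidable (Spec_calculate_line_points x0 y0 x1 y1 thickness out) := by unfold Spec_calculate_line_points; infer_instance

-- ===== CLAIM (what is proved, stated in full; the proofs are below) =====
def Claim_equal_calculate_line_points : Prop := ∀ (x0 : Int) (y0 : Int) (x1 : Int) (y1 : Int) (thickness : Int), Dom_calculate_line_points x0 y0 x1 y1 thickness → Spec_calculate_line_points x0 y0 x1 y1 thickness (calculate_line_points x0 y0 x1 y1 thickness)

-- ===== LEMMAS AND PROOFS =====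
-- pure cons-style centerline of A's loop, for reasoning only
def pvC (dx dy ystep : Int) : Int → Int → Int → Nat → List (Int × Int)
  | _, _, _, 0 => []
  | x, y, e, n+1 =>
    (x, y) ::
      (let e := e - 2 * dy
       if e < 0 then pvC dx dy ystep (x + 1) (y + ystep) (e + 2 * dx) n
       else pvC dx dy ystep (x + 1) y e n)

theorem pvALoop_eq (is_steep : Bool) (thickness dx dy ystep : Int) (n : Nat) :
    ∀ (x y E : Int) (acc : List (Int × Int)),
    pvALoop is_steep thickness dx dy ystep x y E n acc =
      ((pvC dx dy ystep x y E n).flatMap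
        (fun p => (PySem.List.pyRange (PySem.Int.floordiv (-thickness) 2) (PySem.Int.floordiv (thickness + 1) 2) 1).map
          (fun i => if is_steep then (p.2 + i, p.1) else (p.1, p.2 + i)))).reverse ++ acc := by
  induction n with
  | zero => intro x y E acc; simp [pvALoop, pvC]
  | succ n ih =>
    intro x y E acc
    simp only [pvALoop, pvC]
    split <;> rw [ih] <;> simp [List.flatMap_cons, List.append_assoc]

-- closed form for the centerline:
-- the y after j iterations from state (y, E) is y + ystep * ⌊(2*j*dy - E + 2*dx - 1) / (2*dx)⌋
theorem pvC_closed (dx dy ystep : Int) (hdx : 0 < dx) (hdy : 0 ≤ dy) (hdydx : dy ≤ dx) (n : Nat) :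
    ∀ (x y E : Int), 0 ≤ E → E < 2 * dx →
    pvC dx dy ystep x y E n =
      (List.range n).map (fun (j : Nat) =>
        (x + (j : Int), y + ystep * ((2 * (j : Int) * dy - E + 2 * dx - 1) / (2 * dx)))) := by
  induction n with
  | zero => intro x y E _ _; simp [pvC]
  | succ n ih =>
    intro x y E hE0 hE2
    rw [List.range_succ_eq_map]
    simp only [pvC, List.map_cons, List.map_map]
    refine List.cons_eq_cons.mpr ⟨by simp; exact Or.inr (Int.ediv_eq_zero_of_lt (by omega) (by omega)), ?_⟩
    · split <;> rename_i hneg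
      · rw [ih (x+1) (y + ystep) (E - 2*dy + 2*dx) (by omega) (by omega)]
        apply List.map_congr_left
        intro j _
        have key : (2 * ((j:Int)+1) * dy - E + 2 * dx - 1) / (2 * dx)
            = (2 * (j:Int) * dy - (E - 2*dy + 2*dx) + 2 * dx - 1) / (2 * dx) + 1 := by
          have := Int.add_mul_ediv_right (2 * (j:Int) * dy - (E - 2*dy + 2*dx) + 2 * dx - 1) 1 (show 2*dx ≠ 0 by omega)
          have harg : 2 * ((j:Int)+1) * dy - E + 2 * dx - 1
              = 2 * (j:Int) * dy - (E - 2*dy + 2*dx) + 2 * dx - 1 + 1 * (2*dx) := by ring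
          rw [harg, this]
        simp only [Function.comp, Prod.mk.injEq]
        push_cast
        rw [key]
        exact ⟨by ring, by ring⟩
      · rw [ih (x+1) y (E - 2*dy) (by omega) (by omega)]
        apply List.map_congr_left
        intro j _
        have key : (2 * ((j:Int)+1) * dy - E + 2 * dx - 1) / (2 * dx)
            = (2 * (j:Int) * dy - (E - 2*dy) + 2 * dx - 1) / (2 * dx) := by
          congr 1; ring
        simp only [Function.comp, Prod.mk.injEq]
        push_cast
        rw [key]
        exact ⟨by ring, by ring⟩

-- assembly: A's loop from the post-swap state equals B's closed-form flatMap
theorem pvFinal (steep : Bool) (th dx dy ystep x0 y0 : Int)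
    (h0 : 0 ≤ dx) (hdy : 0 ≤ dy) (hdydx : dy ≤ dx) :
    (pvALoop steep th dx dy ystep x0 y0 dx (dx + 1).toNat []).reverse =
      (PySem.List.pyRange 0 (dx + 1) 1).flatMap (fun k =>
        let y := if dx = 0 then y0
                 else y0 + ystep * PySem.Int.floordiv (2 * k * dy + dx - 1) (2 * dx)
        (PySem.List.pyRange (PySem.Int.floordiv (-th) 2) (PySem.Int.floordiv (th + 1) 2) 1).map
          (fun i => if steep then (y + i, x0 + k) else (x0 + k, y + i))) := by
  rw [pvALoop_eq, List.append_nil, List.reverse_reverse]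
  rcases eq_or_lt_of_le h0 with hz | hpos
  · -- dx = 0, hence dy = 0: a single column
    have hdx0 : dx = 0 := hz.symm
    have hdy0 : dy = 0 := le_antisymm (hdx0 ▸ hdydx) hdy
    subst hdx0 hdy0
    rw [PySem.List.pyRange_one_singleton]
    simp [pvC]
  · have hne : dx ≠ 0 := by omega
    rw [pvC_closed dx dy ystep hpos hdy hdydx _ x0 y0 dx h0 (by omega),
        List.flatMap_map, PySem.List.pyRange_one 0 (dx + 1), List.flatMap_map]
    simp only [Int.sub_zero, zero_add]
    apply List.flatMap_congr
    intro j _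
    dsimp only
    simp only [if_neg hne]
    rw [PySem.Int.floordiv_eq_ediv_of_pos (show (0:Int) < 2 * dx by omega)]
    rw [show ∀ j : Int, 2 * j * dy + dx - 1 = 2 * j * dy - dx + 2 * dx - 1 from fun j => by ring]

theorem calculate_line_points_spec : Claim_equal_calculate_line_points := by
  intro X0 Y0 X1 Y1 th _
  unfold Spec_calculate_line_points calculate_line_points calculate_line_points_alt
  by_cases hs : |Y1 - Y0| > |X1 - X0|
  · simp only [hs, decide_true, if_true]
    by_cases hx : Y0 > Y1
    · simp only [hx, if_true]
      rw [show Y0 + 1 - Y1 = (Y0 - Y1) + 1 from by ring]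
      exact pvFinal true th (Y0 - Y1) |X0 - X1| _ Y1 X1
        (by rcases abs_cases (Y1 - Y0) with ⟨g,g2⟩|⟨g,g2⟩ <;> omega)
        (abs_nonneg _)
        (by rcases abs_cases (X0 - X1) with ⟨h,h2⟩|⟨h,h2⟩ <;> rcases abs_cases (Y1 - Y0) with ⟨g,g2⟩|⟨g,g2⟩ <;> rcases abs_cases (X1 - X0) with ⟨f,f2⟩|⟨f,f2⟩ <;> omega)
    · simp only [if_neg hx]
      rw [show Y1 + 1 - Y0 = (Y1 - Y0) + 1 from by ring]
      exact pvFinal true th (Y1 - Y0) |X1 - X0| _ Y0 X0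
        (by omega)
        (abs_nonneg _)
        (by rcases abs_cases (X1 - X0) with ⟨h,h2⟩|⟨h,h2⟩ <;> rcases abs_cases (Y1 - Y0) with ⟨g,g2⟩|⟨g,g2⟩ <;> omega)
  · simp only [hs, decide_false, Bool.false_eq_true, if_false]
    by_cases hx : X0 > X1
    · simp only [hx, if_true]
      rw [show X0 + 1 - X1 = (X0 - X1) + 1 from by ring]
      exact pvFinal false th (X0 - X1) |Y0 - Y1| _ X1 Y1
        (by omega)
        (abs_nonneg _)
        (by rcases abs_cases (Y0 - Y1) with ⟨h,h2⟩|⟨h,h2⟩ <;> rcases abs_cases (Y1 - Y0) with ⟨g,g2⟩|⟨g,g2⟩ <;> rcases abs_cases (X1 - X0) with ⟨f,f2⟩|⟨f,f2⟩ <;> omega)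
    · simp only [if_neg hx]
      rw [show X1 + 1 - X0 = (X1 - X0) + 1 from by ring]
      exact pvFinal false th (X1 - X0) |Y1 - Y0| _ X0 Y0
        (by omega)
        (abs_nonneg _)
        (by rcases abs_cases (Y1 - Y0) with ⟨g,g2⟩|⟨g,g2⟩ <;> rcases abs_cases (X1 - X0) with ⟨f,f2⟩|⟨f,f2⟩ <;> omega)
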